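-- pv_equiv track=rewrite | github.com/Costadoat/Informatique | DS/2016-2017/CB1/exo1.py | triangle2
-- ===== SOURCE A (Python) =====
-- def rect(a,b,c):
--     A=a**2
--     B=b**2
--     C=c**2
--     if A==B+C or B==A+C or C==A+B:
--         return(True)
--     else:
--         return(False)
--
-- def triangle2(p):
--     L=[]
--     c=0
--     for a in range(1,p//3+1):
--         for b in range(a,(p-a)//2+1):
--             c=c+1
--             if rect(a,b,p-a-b):
--                 L.append((a,b,p-a-b))
--     return(L,c)
-- ===== SOURCE B (Python) =====
-- def triangle2(p):
--     # Per a, b is forced by (p-a-b)**2 = a**2 + b**2  =>  b = p*(p-2*a) / (2*(p-a));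
--     # the iteration counter is the inner range length, summed in closed form per a.
--     L = []
--     c = 0
--     for a in range(1, p // 3 + 1):
--         hi = (p - a) // 2
--         if hi >= a:
--             c += hi - a + 1
--         num = p * (p - 2 * a)
--         den = 2 * (p - a)
--         if num % den == 0:
--             b = num // den
--             if a <= b <= hi:
--                 L.append((a, b, p - a - b))
--     return (L, c)
-- ===== Notes on version B (the rewrite author's own statement) =====
-- stated objective: faster
-- what changed: Replaces the inner scan over all b with the closed-form solution b = p*(p-2a)/(2*(p-a)) of (p-a-b)^2 = a^2+b^2 per a, and replaces the per-iteration counter with the closed-form inner-range length hi-a+1.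
import Mathlib
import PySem

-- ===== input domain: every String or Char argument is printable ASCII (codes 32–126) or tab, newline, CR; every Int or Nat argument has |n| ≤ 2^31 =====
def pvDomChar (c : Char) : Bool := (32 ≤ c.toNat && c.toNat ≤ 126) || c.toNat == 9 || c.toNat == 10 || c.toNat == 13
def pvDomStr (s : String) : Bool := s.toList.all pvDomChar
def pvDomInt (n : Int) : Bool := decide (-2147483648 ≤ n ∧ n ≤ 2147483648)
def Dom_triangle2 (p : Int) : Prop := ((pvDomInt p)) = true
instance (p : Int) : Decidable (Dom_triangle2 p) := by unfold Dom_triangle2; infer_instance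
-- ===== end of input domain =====

-- B replaces A's quadratic inner scan over b by the closed-form solution b = p(p-2a)/(2(p-a))
-- and a per-a closed-form iteration count: O(p) instead of O(p^2).

-- ===== PORT A =====
def rect (a b c : Int) : Bool :=
  let A := a ^ 2
  let B := b ^ 2
  let C := c ^ 2
  if A == B + C || B == A + C || C == A + B then true else false

def triangle2 (p : Int) : (List (Int × Int × Int)) × Int :=
  (PySem.List.pyRange 1 (PySem.Int.floordiv p 3 + 1) 1).foldl (fun st a =>
    (PySem.List.pyRange a (PySem.Int.floordiv (p - a) 2 + 1) 1).foldl (fun st2 b =>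
      let c := st2.2 + 1
      if rect a b (p - a - b) then (st2.1 ++ [(a, b, p - a - b)], c) else (st2.1, c)) st)
    ([], 0)

-- ===== PORT B =====
def triangle2_alt (p : Int) : (List (Int × Int × Int)) × Int :=
  (PySem.List.pyRange 1 (PySem.Int.floordiv p 3 + 1) 1).foldl (fun st a =>
    let hi := PySem.Int.floordiv (p - a) 2
    let c := if hi ≥ a then st.2 + (hi - a + 1) else st.2
    let num := p * (p - 2 * a)
    let den := 2 * (p - a)
    if PySem.Int.mod num den == 0 then
      let b := PySem.Int.floordiv num den
      if a ≤ b ∧ b ≤ hi then (st.1 ++ [(a, b, p - a - b)], c) else (st.1, c)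
    else (st.1, c))
    ([], 0)

-- ===== PRECONDITION & SPEC =====
def Spec_triangle2 (p : Int) (out : (List (Int × Int × Int)) × Int) : Prop := out = triangle2_alt p
instance (p : Int) (out : (List (Int × Int × Int)) × Int) : Decidable (Spec_triangle2 p out) := by unfold Spec_triangle2; infer_instance

-- ===== CLAIM (what is proved, stated in full; the proofs are below) =====
def Claim_equal_triangle2 : Prop := ∀ (p : Int), Dom_triangle2 p → Spec_triangle2 p (triangle2 p)

-- ===== LEMMAS AND PROOFS =====

-- A's inner loop: always count, conditionally append.
lemma innerA_eq (p a : Int) (l : List Int) (st : List (Int × Int × Int) × Int) :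
    l.foldl (fun st2 b =>
      let c := st2.2 + 1
      if rect a b (p - a - b) then (st2.1 ++ [(a, b, p - a - b)], c) else (st2.1, c)) st
    = (st.1 ++ (l.filter (fun b => rect a b (p - a - b))).map (fun b => (a, b, p - a - b)),
       st.2 + l.length) := by
  induction l generalizing st with
  | nil => simp
  | cons x xs ih =>
    simp only [List.foldl_cons, List.filter_cons, List.length_cons]
    by_cases h : rect a x (p - a - x)
    · simp [h, ih]; ring
    · simp [h, ih]; ring

-- On the inner range (1 ≤ a, 3a ≤ p, a ≤ b, 2b ≤ p - a), the Pythagorean test is linear in b.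
lemma rect_iff (p a b : Int) (ha1 : 1 ≤ a) (hap : 3 * a ≤ p) (hab : a ≤ b) (hb : 2 * b ≤ p - a) :
    rect a b (p - a - b) = (2 * (p - a) * b == p * (p - 2 * a)) := by
  simp only [rect]
  split_ifs with h
  · symm
    rw [beq_iff_eq]
    simp only [Bool.or_eq_true, beq_iff_eq] at h
    rcases h with (h | h) | h
    · nlinarith
    · nlinarith
    · nlinarith
  · symm
    rw [beq_eq_false_iff_ne]
    simp only [Bool.or_eq_true, beq_iff_eq] at h
    intro hc
    exact h (Or.inr (by nlinarith))

-- filter by a linear equation with positive coefficient = the closed-form singleton.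
lemma filter_linear (den num lo hi : Int) (hden : 0 < den) :
    (PySem.List.pyRange lo (hi + 1) 1).filter (fun b => den * b == num)
    = if PySem.Int.mod num den = 0 ∧ lo ≤ PySem.Int.floordiv num den ∧ PySem.Int.floordiv num den ≤ hi
      then [PySem.Int.floordiv num den] else [] := by
  have key : ∀ b : Int, den * b = num ↔ (PySem.Int.mod num den = 0 ∧ PySem.Int.floordiv num den = b) := by
    intro b
    constructor
    · intro h
      have hd : den ∣ num := ⟨b, h.symm⟩
      have hm : PySem.Int.mod num den = 0 := (PySem.Int.mod_eq_zero_iff_dvd num den).mpr hd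
      refine ⟨hm, ?_⟩
      have hfm := PySem.Int.floordiv_mul_add_mod num den
      rw [hm] at hfm
      have h2 : PySem.Int.floordiv num den * den = b * den := by
        rw [mul_comm b den]; linarith
      exact mul_right_cancel₀ (by omega) h2
    · rintro ⟨hm, hk⟩
      have hfm := PySem.Int.floordiv_mul_add_mod num den
      rw [hm, hk] at hfm
      linarith [mul_comm b den]
  split_ifs with h
  · obtain ⟨hm, hlo, hhi⟩ := h
    have hcong : (PySem.List.pyRange lo (hi + 1) 1).filter (fun b => den * b == num)
        = (PySem.List.pyRange lo (hi + 1) 1).filter (fun b => b == PySem.Int.floordiv num den) := by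
      apply List.filter_congr
      intro b _
      rw [Bool.eq_iff_iff, beq_iff_eq, beq_iff_eq, key b]
      constructor
      · rintro ⟨_, h2⟩; exact h2.symm
      · intro h2; exact ⟨hm, h2.symm⟩
    rw [hcong]
    have hmem : PySem.Int.floordiv num den ∈ PySem.List.pyRange lo (hi + 1) 1 :=
      (PySem.List.mem_pyRange_one).mpr ⟨hlo, by omega⟩
    rw [List.filter_beq, List.count_eq_one_of_mem (PySem.List.nodup_pyRange_one lo (hi + 1)) hmem,
        List.replicate_one]
  · apply List.filter_eq_nil_iff.mpr
    intro b hb hcon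
    have hcon' : den * b = num := by simpa using hcon
    obtain ⟨hm, hk⟩ := (key b).mp hcon'
    have hmb := (PySem.List.mem_pyRange_one).mp hb
    exact h ⟨hm, by omega, by omega⟩

-- the per-a step functions agree for every a of the outer range.
lemma step_eq (p a : Int) (ha : a ∈ PySem.List.pyRange 1 (PySem.Int.floordiv p 3 + 1) 1)
    (st : List (Int × Int × Int) × Int) :
    (PySem.List.pyRange a (PySem.Int.floordiv (p - a) 2 + 1) 1).foldl (fun st2 b =>
      let c := st2.2 + 1
      if rect a b (p - a - b) then (st2.1 ++ [(a, b, p - a - b)], c) else (st2.1, c)) st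
    = (if PySem.Int.mod (p * (p - 2 * a)) (2 * (p - a)) == 0 then
         if a ≤ PySem.Int.floordiv (p * (p - 2 * a)) (2 * (p - a)) ∧
            PySem.Int.floordiv (p * (p - 2 * a)) (2 * (p - a)) ≤ PySem.Int.floordiv (p - a) 2 then
           (st.1 ++ [(a, PySem.Int.floordiv (p * (p - 2 * a)) (2 * (p - a)),
              p - a - PySem.Int.floordiv (p * (p - 2 * a)) (2 * (p - a)))],
            if PySem.Int.floordiv (p - a) 2 ≥ a then
              st.2 + (PySem.Int.floordiv (p - a) 2 - a + 1) else st.2)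
         else (st.1, if PySem.Int.floordiv (p - a) 2 ≥ a then
              st.2 + (PySem.Int.floordiv (p - a) 2 - a + 1) else st.2)
       else (st.1, if PySem.Int.floordiv (p - a) 2 ≥ a then
              st.2 + (PySem.Int.floordiv (p - a) 2 - a + 1) else st.2)) := by
  obtain ⟨ha1, ha2⟩ := (PySem.List.mem_pyRange_one).mp ha
  have hap : 3 * a ≤ p := by
    have := (PySem.Int.le_floordiv_iff_mul_le (a := p) (b := 3) (q := a) (by norm_num)).mp (by omega)
    omega
  set hi := PySem.Int.floordiv (p - a) 2 with hhi
  have hden : 0 < 2 * (p - a) := by omega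
  rw [innerA_eq]
  have hfil : (PySem.List.pyRange a (hi + 1) 1).filter (fun b => rect a b (p - a - b))
      = (PySem.List.pyRange a (hi + 1) 1).filter (fun b => 2 * (p - a) * b == p * (p - 2 * a)) := by
    apply List.filter_congr
    intro b hb
    obtain ⟨hb1, hb2⟩ := (PySem.List.mem_pyRange_one).mp hb
    have h2b : 2 * b ≤ p - a := by
      have := (PySem.Int.le_floordiv_iff_mul_le (a := p - a) (b := 2) (q := b) (by norm_num)).mp (by omega)
      omega
    exact rect_iff p a b ha1 hap hb1 h2b
  rw [hfil, filter_linear _ _ _ _ hden]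
  have hcnt : st.2 + ((PySem.List.pyRange a (hi + 1) 1).length : Int)
      = if hi ≥ a then st.2 + (hi - a + 1) else st.2 := by
    rw [PySem.List.length_pyRange_one]
    split_ifs with h <;> omega
  by_cases hm : PySem.Int.mod (p * (p - 2 * a)) (2 * (p - a)) = 0
  · have hmb : (PySem.Int.mod (p * (p - 2 * a)) (2 * (p - a)) == 0) = true := by
      simp [hm]
    by_cases hrg : a ≤ PySem.Int.floordiv (p * (p - 2 * a)) (2 * (p - a)) ∧
        PySem.Int.floordiv (p * (p - 2 * a)) (2 * (p - a)) ≤ hi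
    · rw [if_pos ⟨hm, hrg.1, hrg.2⟩, hmb, if_pos rfl, if_pos hrg]
      simp only [List.map_cons, List.map_nil]
      exact Prod.ext rfl hcnt
    · rw [if_neg (by tauto), hmb, if_pos rfl, if_neg hrg]
      simp only [List.map_nil, List.append_nil]
      exact Prod.ext rfl hcnt
  · have hmb : (PySem.Int.mod (p * (p - 2 * a)) (2 * (p - a)) == 0) = false := by
      simpa using hm
    rw [if_neg (by tauto), hmb]
    simp only [List.map_nil, List.append_nil, Bool.false_eq_true, if_false]
    exact Prod.ext rfl hcnt

-- ===== VERDICT (by name: the statement is the Claim_ definition above) =====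
theorem triangle2_spec : Claim_equal_triangle2 := by
  intro p _
  unfold Spec_triangle2 triangle2 triangle2_alt
  apply PySem.List.foldl_congr_mem
  intro st a ha
  exact step_eq p a ha st
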